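-- pv_equiv track=rewrite | github.com/jianlin-cheng/DeepGRN | debug/utils.py | get_batch_num_seg
-- ===== SOURCE A (Python) =====
-- def get_batch_num_seg(seg_size,bin_num,batch_size):
--     if seg_size == 0:
--         return 0
--     elif seg_size <= bin_num:
--         return 1
--     elif seg_size < bin_num * batch_size:
--         if seg_size % bin_num == 0:
--             return 1
--         else:
--             return 2
--     else:
--         l = (seg_size // (bin_num*batch_size)) + get_batch_num_seg((seg_size % (bin_num*batch_size)),bin_num,batch_size)
--         return int(l)
-- ===== SOURCE B (Python) =====
-- def get_batch_num_seg(seg_size, bin_num, batch_size):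
--     # Non-recursive: one divmod, then a flat branch table (the recursion in the
--     # original descends at most one level on every input where it terminates).
--     if seg_size == 0:
--         return 0
--     if seg_size <= bin_num:
--         return 1
--     P = bin_num * batch_size
--     if seg_size < P:
--         return 1 if seg_size % bin_num == 0 else 2
--     q, r = divmod(seg_size, P)
--     if r == 0:
--         return q
--     if r <= bin_num:
--         return q + 1
--     return q + (1 if r % bin_num == 0 else 2)
-- ===== Notes on version B (the rewrite author's own statement) =====
-- stated objective: simpler
-- what changed: Replaces the self-recursion by a single divmod followed by a flat branch table, using the fact that the recursion descends at most one level whenever it terminates.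
import Mathlib
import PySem

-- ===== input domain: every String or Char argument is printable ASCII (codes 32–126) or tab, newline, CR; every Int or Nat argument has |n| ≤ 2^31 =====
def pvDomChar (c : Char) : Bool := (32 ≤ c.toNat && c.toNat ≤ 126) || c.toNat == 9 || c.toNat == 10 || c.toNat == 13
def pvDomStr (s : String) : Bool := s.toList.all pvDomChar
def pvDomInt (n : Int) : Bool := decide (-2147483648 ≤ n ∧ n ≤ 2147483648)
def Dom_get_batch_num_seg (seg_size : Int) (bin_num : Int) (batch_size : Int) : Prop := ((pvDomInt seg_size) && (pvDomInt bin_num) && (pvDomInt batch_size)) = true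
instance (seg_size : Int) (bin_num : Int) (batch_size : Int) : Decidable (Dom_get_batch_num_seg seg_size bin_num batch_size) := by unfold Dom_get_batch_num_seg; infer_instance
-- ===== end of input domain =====

-- B replaces A's self-recursion by one divmod and a flat branch table (objective: simpler).

-- ===== PORT A =====
-- Fuel makes A's self-recursion well-founded in Lean; inside Pre_ the recursion
-- descends at most one level, so fuel 2 reproduces the Python exactly there.
def gbnsA : Nat → Int → Int → Int → Int
  | 0, _, _, _ => 0
  | fuel + 1, seg_size, bin_num, batch_size =>
    if seg_size = 0 then 0
    else if seg_size ≤ bin_num then 1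
    else if seg_size < bin_num * batch_size then
      (if PySem.Int.mod seg_size bin_num = 0 then 1 else 2)
    else
      PySem.Int.floordiv seg_size (bin_num * batch_size) +
        gbnsA fuel (PySem.Int.mod seg_size (bin_num * batch_size)) bin_num batch_size

def get_batch_num_seg (seg_size : Int) (bin_num : Int) (batch_size : Int) : Int :=
  gbnsA 2 seg_size bin_num batch_size

-- ===== PORT B =====
def get_batch_num_seg_alt (seg_size : Int) (bin_num : Int) (batch_size : Int) : Int :=
  if seg_size = 0 then 0
  else if seg_size ≤ bin_num then 1
  else
    let P := bin_num * batch_size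
    if seg_size < P then (if PySem.Int.mod seg_size bin_num = 0 then 1 else 2)
    else
      let q := PySem.Int.floordiv seg_size P
      let r := PySem.Int.mod seg_size P
      if r = 0 then q
      else if r ≤ bin_num then q + 1
      else q + (if PySem.Int.mod r bin_num = 0 then 1 else 2)

-- ===== PRECONDITION & SPEC =====
-- Pre_ excludes exactly the inputs where A does not return: bin_num*batch_size = 0 with
-- seg_size > max(bin_num,0) (ZeroDivisionError), and the negative-product region where
-- A recurses forever on an unchanging remainder (RecursionError).
def Pre_get_batch_num_seg (seg_size : Int) (bin_num : Int) (batch_size : Int) : Prop :=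
  ¬ (bin_num * batch_size = 0 ∧ bin_num < seg_size ∧ 0 < seg_size) ∧
  ¬ (bin_num * batch_size < 0 ∧ seg_size ≠ 0 ∧ bin_num < seg_size ∧
      PySem.Int.mod seg_size (bin_num * batch_size) ≠ 0 ∧
      bin_num < PySem.Int.mod seg_size (bin_num * batch_size))
instance (seg_size : Int) (bin_num : Int) (batch_size : Int) : Decidable (Pre_get_batch_num_seg seg_size bin_num batch_size) := by unfold Pre_get_batch_num_seg; infer_instance

def pvWitness_get_batch_num_seg : Int × Int × Int := (17, 3, 2)

def Spec_get_batch_num_seg (seg_size : Int) (bin_num : Int) (batch_size : Int) (out : Int) : Prop := out = get_batch_num_seg_alt seg_size bin_num batch_size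
instance (seg_size : Int) (bin_num : Int) (batch_size : Int) (out : Int) : Decidable (Spec_get_batch_num_seg seg_size bin_num batch_size out) := by unfold Spec_get_batch_num_seg; infer_instance

-- ===== CLAIM (what is proved, stated in full; the proofs are below) =====
def Claim_equal_get_batch_num_seg : Prop := ∀ (seg_size : Int) (bin_num : Int) (batch_size : Int), Dom_get_batch_num_seg seg_size bin_num batch_size → Pre_get_batch_num_seg seg_size bin_num batch_size → Spec_get_batch_num_seg seg_size bin_num batch_size (get_batch_num_seg seg_size bin_num batch_size)
-- ===== LEMMAS AND PROOFS =====

-- ===== VERDICT (by name: the statement is the Claim_ definition above) =====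
theorem get_batch_num_seg_spec : Claim_equal_get_batch_num_seg := by
  intro s b k _ hpre
  unfold Spec_get_batch_num_seg get_batch_num_seg get_batch_num_seg_alt
  obtain ⟨hz, hd⟩ := hpre
  by_cases h0 : s = 0
  · simp [gbnsA, h0]
  by_cases h1 : s ≤ b
  · simp [gbnsA, h0, h1]
  by_cases h2 : s < b * k
  · simp [gbnsA, h0, h1, h2]
  · by_cases hr0 : PySem.Int.mod s (b * k) = 0
    · simp [gbnsA, h0, h1, h2, hr0]
    · by_cases hrb : PySem.Int.mod s (b * k) ≤ b
      · simp [gbnsA, h0, h1, h2, hr0, hrb]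
      · -- remaining case: Pre_ forces b*k > 0, hence mod s (b*k) < b*k and the
        -- recursive call in A takes its third branch, matching B's last branch
        have hPpos : 0 < b * k := by
          rcases lt_trichotomy (b * k) 0 with hneg | h0P | hpos
          · exact absurd ⟨hneg, h0, by omega, hr0, by omega⟩ hd
          · exact absurd ⟨h0P, by omega, by omega⟩ hz
          · exact hpos
        have hrP : PySem.Int.mod s (b * k) < b * k := PySem.Int.mod_lt s hPpos
        simp [gbnsA, h0, h1, h2, hr0, hrb, hrP]
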